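-- pv_equiv track=rewrite | github.com/KyporenkoV/les-8-pandas | app.py | get_pref_color
-- ===== SOURCE A (Python) =====
-- def get_pref_color(data):
--     data = dict(data)
--     res1 = {}
--     res2 = {}
--
--     for x in data:
--         if x.__divmod__(2)[1] == 0:
--             res2.update({x: data[x]})
--         else:
--             res1.update({x: data[x]})
--
--     red, black = 0, 0
--
--     for x in res1:
--         black += res1[x]
--
--     for y in res2:
--         if y == 0:
--             continue
--         else:
--             red += res2[y]
--
--     if red > black:
--         res_color = "red"
--     elif red < black:
--         res_color = "black"
--     else:
--         res_color = 'equal'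
--
--     return res_color
-- ===== SOURCE B (Python) =====
-- def get_pref_color(data):
--     data = dict(data)
--     red = 0
--     black = 0
--     for x in data:
--         if x % 2 != 0:
--             black += data[x]
--         elif x != 0:
--             red += data[x]
--     if red > black:
--         return "red"
--     if red < black:
--         return "black"
--     return "equal"
-- ===== Notes on version B (the rewrite author's own statement) =====
-- stated objective: simpler
-- what changed: B drops the two intermediate dicts res1/res2 and their re-scan loops, keeping just two running sums in a single pass over the deduplicated keys (key 0 contributes to neither).
import Mathlib
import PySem

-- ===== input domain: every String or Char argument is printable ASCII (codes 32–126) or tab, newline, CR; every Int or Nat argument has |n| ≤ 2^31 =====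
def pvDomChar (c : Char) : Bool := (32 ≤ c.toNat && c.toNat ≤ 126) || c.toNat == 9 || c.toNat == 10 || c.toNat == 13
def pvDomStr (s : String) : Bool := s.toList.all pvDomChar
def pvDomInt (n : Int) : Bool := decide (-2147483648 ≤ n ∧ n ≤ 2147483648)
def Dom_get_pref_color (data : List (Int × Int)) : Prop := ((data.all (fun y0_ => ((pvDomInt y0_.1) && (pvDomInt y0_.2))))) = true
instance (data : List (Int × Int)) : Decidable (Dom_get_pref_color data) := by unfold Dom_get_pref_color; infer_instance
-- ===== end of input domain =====

-- B replaces A's two intermediate dicts and their re-scan loops by two running sums in one pass (simpler).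

-- ===== PORT A =====
def get_pref_color (data : List (Int × Int)) : String :=
  let d : PySem.Dict Int Int := PySem.Dict.ofList data
  -- for x in data: fill res1 (odd keys) / res2 (even keys)
  let rs : PySem.Dict Int Int × PySem.Dict Int Int :=
    d.keys.foldl (fun p x =>
      if PySem.Int.mod x 2 = 0 then (p.1, p.2.insert x (d.getD x 0))
      else (p.1.insert x (d.getD x 0), p.2)) (PySem.Dict.empty, PySem.Dict.empty)
  let res1 := rs.1
  let res2 := rs.2
  let black : Int := res1.keys.foldl (fun b x => b + res1.getD x 0) 0
  let red : Int := res2.keys.foldl (fun r y => if y = 0 then r else r + res2.getD y 0) 0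
  if red > black then "red" else if red < black then "black" else "equal"

-- ===== PORT B =====
def get_pref_color_alt (data : List (Int × Int)) : String :=
  let d : PySem.Dict Int Int := PySem.Dict.ofList data
  let rb : Int × Int :=
    d.keys.foldl (fun p x =>
      if PySem.Int.mod x 2 ≠ 0 then (p.1, p.2 + d.getD x 0)
      else if x ≠ 0 then (p.1 + d.getD x 0, p.2)
      else p) (0, 0)
  if rb.1 > rb.2 then "red" else if rb.1 < rb.2 then "black" else "equal"

-- ===== PRECONDITION & SPEC =====
def Spec_get_pref_color (data : List (Int × Int)) (out : String) : Prop := out = get_pref_color_alt data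
instance (data : List (Int × Int)) (out : String) : Decidable (Spec_get_pref_color data out) := by unfold Spec_get_pref_color; infer_instance

-- ===== CLAIM (what is proved, stated in full; the proofs are below) =====
def Claim_equal_get_pref_color : Prop := ∀ (data : List (Int × Int)), Dom_get_pref_color data → Spec_get_pref_color data (get_pref_color data)

-- ===== LEMMAS AND PROOFS =====

-- A's one loop filling the pair of dicts is, componentwise, a fold over the filtered key list.
theorem pv_split_fst (d : PySem.Dict Int Int) :
    ∀ (K : List Int) (p : PySem.Dict Int Int × PySem.Dict Int Int),
      (K.foldl (fun p x =>
        if PySem.Int.mod x 2 = 0 then (p.1, p.2.insert x (d.getD x 0))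
        else (p.1.insert x (d.getD x 0), p.2)) p).1
      = (K.filter (fun x => !(PySem.Int.mod x 2 = 0))).foldl
          (fun q x => q.insert x (d.getD x 0)) p.1 := by
  intro K
  induction K with
  | nil => intro p; rfl
  | cons x K ih =>
      intro p
      by_cases h : PySem.Int.mod x 2 = 0
      · rw [List.foldl_cons, if_pos h, ih, List.filter_cons_of_neg (by have h' := h; rw [PySem.Int.mod_eq_emod_of_pos (by norm_num)] at h'; simp; all_goals omega)]
      · rw [List.foldl_cons, if_neg h, ih, List.filter_cons_of_pos (by have h' := h; rw [PySem.Int.mod_eq_emod_of_pos (by norm_num)] at h'; simp; all_goals omega), List.foldl_cons]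

theorem pv_split_snd (d : PySem.Dict Int Int) :
    ∀ (K : List Int) (p : PySem.Dict Int Int × PySem.Dict Int Int),
      (K.foldl (fun p x =>
        if PySem.Int.mod x 2 = 0 then (p.1, p.2.insert x (d.getD x 0))
        else (p.1.insert x (d.getD x 0), p.2)) p).2
      = (K.filter (fun x => PySem.Int.mod x 2 = 0)).foldl
          (fun q x => q.insert x (d.getD x 0)) p.2 := by
  intro K
  induction K with
  | nil => intro p; rfl
  | cons x K ih =>
      intro p
      by_cases h : PySem.Int.mod x 2 = 0
      · rw [List.foldl_cons, if_pos h, ih, List.filter_cons_of_pos (by have h' := h; rw [PySem.Int.mod_eq_emod_of_pos (by norm_num)] at h'; simp; all_goals omega), List.foldl_cons]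
      · rw [List.foldl_cons, if_neg h, ih, List.filter_cons_of_neg (by have h' := h; rw [PySem.Int.mod_eq_emod_of_pos (by norm_num)] at h'; simp; all_goals omega)]

-- a fresh-key insert loop from empty: items are exactly the (key, value) pairs
theorem pv_res_items (d : PySem.Dict Int Int) (l : List Int) (hnd : l.Nodup) :
    (l.foldl (fun q x => q.insert x (d.getD x 0)) PySem.Dict.empty).items
      = l.map (fun x => (x, d.getD x 0)) := by
  have := PySem.Dict.items_foldl_insert_fresh (d := PySem.Dict.empty)
      (l := l) (k := fun x => x) (v := fun x => d.getD x 0)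
      (by intro a _; simp) (by simpa using hnd)
  simpa using this

-- sum loops as List.sum of a map
theorem pv_foldl_add (g : Int → Int) :
    ∀ (l : List Int) (b : Int), l.foldl (fun b x => b + g x) b = b + (l.map g).sum := by
  intro l
  induction l with
  | nil => intro b; simp
  | cons x l ih => intro b; simp [ih]; ring

theorem pv_foldl_red (g : Int → Int) :
    ∀ (l : List Int) (r : Int),
      l.foldl (fun r y => if y = 0 then r else r + g y) r
        = r + ((l.filter (fun y => !(y = 0))).map g).sum := by
  intro l
  induction l with
  | nil => intro r; simp
  | cons y l ih =>
      intro r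
      by_cases h : y = 0 <;> simp [h, ih] <;> ring

-- B's single pass computes the pair of the two filtered sums
theorem pv_bfold (g : Int → Int) :
    ∀ (K : List Int) (r b : Int),
      (K.foldl (fun (p : Int × Int) x =>
        if PySem.Int.mod x 2 ≠ 0 then (p.1, p.2 + g x)
        else if x ≠ 0 then (p.1 + g x, p.2)
        else p) (r, b))
      = (r + (((K.filter (fun x => PySem.Int.mod x 2 = 0)).filter (fun y => !(y = 0))).map g).sum,
         b + ((K.filter (fun x => !(PySem.Int.mod x 2 = 0))).map g).sum) := by
  intro K
  induction K with
  | nil => intro r b; simp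
  | cons x K ih =>
      intro r b
      by_cases h : PySem.Int.mod x 2 = 0
      · by_cases h0 : x = 0
        · rw [List.foldl_cons, if_neg (not_not_intro h), if_neg (not_not_intro h0), ih,
              List.filter_cons_of_pos (by have h' := h; rw [PySem.Int.mod_eq_emod_of_pos (by norm_num)] at h'; simp; all_goals omega), List.filter_cons_of_neg (by simp [h0]),
              List.filter_cons_of_neg (by have h' := h; rw [PySem.Int.mod_eq_emod_of_pos (by norm_num)] at h'; simp; all_goals omega)]
        · rw [List.foldl_cons, if_neg (not_not_intro h), if_pos h0, ih,
              List.filter_cons_of_pos (by have h' := h; rw [PySem.Int.mod_eq_emod_of_pos (by norm_num)] at h'; simp; all_goals omega), List.filter_cons_of_pos (by simp [h0]),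
              List.filter_cons_of_neg (by have h' := h; rw [PySem.Int.mod_eq_emod_of_pos (by norm_num)] at h'; simp; all_goals omega)]
          simp only [List.map_cons, List.sum_cons, Prod.mk.injEq]
          constructor <;> first | trivial | ring
      · rw [List.foldl_cons, if_pos h, ih,
            List.filter_cons_of_neg (by have h' := h; rw [PySem.Int.mod_eq_emod_of_pos (by norm_num)] at h'; simp; all_goals omega), List.filter_cons_of_pos (by have h' := h; rw [PySem.Int.mod_eq_emod_of_pos (by norm_num)] at h'; simp; all_goals omega)]
        simp only [List.map_cons, List.sum_cons, Prod.mk.injEq]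
        constructor <;> first | trivial | ring

-- ===== VERDICT (by name: the statement is the Claim_ definition above) =====
theorem get_pref_color_spec : Claim_equal_get_pref_color := by
  intro data _
  unfold Spec_get_pref_color get_pref_color get_pref_color_alt
  dsimp only
  set d : PySem.Dict Int Int := PySem.Dict.ofList data with hd
  have hnd : d.keys.Nodup := PySem.Dict.nodup_keys_ofList data
  -- split A's pair-of-dicts loop
  rw [pv_split_fst d, pv_split_snd d]
  set lodd := d.keys.filter (fun x => !(PySem.Int.mod x 2 = 0)) with hlodd
  set lev := d.keys.filter (fun x => PySem.Int.mod x 2 = 0) with hlev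
  have hnodd : lodd.Nodup := hnd.filter _
  have hnev : lev.Nodup := hnd.filter _
  set res1 := lodd.foldl (fun q x => q.insert x (d.getD x 0)) PySem.Dict.empty with hres1
  set res2 := lev.foldl (fun q x => q.insert x (d.getD x 0)) PySem.Dict.empty with hres2
  have hit1 : res1.items = lodd.map (fun x => (x, d.getD x 0)) := pv_res_items d lodd hnodd
  have hit2 : res2.items = lev.map (fun x => (x, d.getD x 0)) := pv_res_items d lev hnev
  have hk1 : res1.keys = lodd := by
    simp only [PySem.Dict.keys, hit1, List.map_map]
    exact List.map_id lodd
  have hk2 : res2.keys = lev := by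
    simp only [PySem.Dict.keys, hit2, List.map_map]
    exact List.map_id lev
  have hnk1 : res1.keys.Nodup := by rw [hk1]; exact hnodd
  have hnk2 : res2.keys.Nodup := by rw [hk2]; exact hnev
  -- lookups in res1/res2 agree with d on their keys
  have hg1 : ∀ x ∈ lodd, res1.getD x 0 = d.getD x 0 := by
    intro x hx
    exact PySem.Dict.getD_of_mem_items res1 (by rw [hit1]; exact List.mem_map_of_mem hx) hnk1 0
  have hg2 : ∀ x ∈ lev, res2.getD x 0 = d.getD x 0 := by
    intro x hx
    exact PySem.Dict.getD_of_mem_items res2 (by rw [hit2]; exact List.mem_map_of_mem hx) hnk2 0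
  rw [hk1, hk2]
  rw [pv_foldl_add (fun x => res1.getD x 0) lodd 0,
      pv_foldl_red (fun y => res2.getD y 0) lev 0,
      pv_bfold (fun x => d.getD x 0) d.keys 0 0]
  have hm1 : lodd.map (fun x => res1.getD x 0) = lodd.map (fun x => d.getD x 0) :=
    List.map_congr_left hg1
  have hm2 : (lev.filter (fun y => !(y = 0))).map (fun y => res2.getD y 0)
      = (lev.filter (fun y => !(y = 0))).map (fun y => d.getD y 0) :=
    List.map_congr_left (fun y hy => hg2 y (List.mem_of_mem_filter hy))
  rw [hm1, hm2]
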